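-- pv_equiv track=rewrite | github.com/charlesSeek/MachineLearning | Validation/py/CrossValidation2.py | getTrainAndValidationData
-- ===== SOURCE A (Python) =====
-- def getTrainAndValidationData(data,v,sequenceid):
-- 	size = int(len(data)/v)
-- 	traindata = []
-- 	validationdata = []
-- 	for i in range(len(data)):
-- 		if i>=sequenceid*size and i<(sequenceid+1)*size:
-- 			validationdata.append(data[i])
-- 		else:
-- 			traindata.append(data[i])
-- 	return traindata,validationdata
-- ===== SOURCE B (Python) =====
-- def getTrainAndValidationData(data, v, sequenceid):
--     size = int(len(data) / v)
--     n = len(data)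
--     start = sequenceid * size
--     end = start + size
--     lo = max(0, min(start, n))
--     hi = max(lo, min(end, n))
--     return list(data[:lo]) + list(data[hi:]), list(data[lo:hi])
-- ===== Notes on version B (the rewrite author's own statement) =====
-- stated objective: simpler
-- what changed: Replaces the per-element loop with an in-interval branch by computing the clamped fold boundaries [lo,hi) once and returning the three pieces by slicing and concatenation.
import Mathlib
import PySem

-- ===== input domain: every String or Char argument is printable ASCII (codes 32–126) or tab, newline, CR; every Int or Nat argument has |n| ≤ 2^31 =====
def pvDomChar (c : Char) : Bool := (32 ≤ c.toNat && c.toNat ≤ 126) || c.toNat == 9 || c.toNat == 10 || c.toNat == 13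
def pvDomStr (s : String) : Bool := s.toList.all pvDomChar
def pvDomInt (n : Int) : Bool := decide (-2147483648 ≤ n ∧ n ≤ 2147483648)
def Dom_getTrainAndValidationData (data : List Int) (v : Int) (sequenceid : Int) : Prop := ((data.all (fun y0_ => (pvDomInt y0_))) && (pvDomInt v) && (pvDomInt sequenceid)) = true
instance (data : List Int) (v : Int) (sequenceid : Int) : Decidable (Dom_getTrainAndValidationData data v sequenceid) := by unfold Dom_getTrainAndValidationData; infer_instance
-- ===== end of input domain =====

-- B replaces A's per-index loop-with-branch by computing the clamped fold boundaries once and slicing (objective: simpler).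


-- ===== PORT A =====
def getTrainAndValidationData (data : List Int) (v : Int) (sequenceid : Int) : List Int × List Int :=
  let size := PySem.Int.truncdiv (data.length : Int) v   -- int(len(data)/v)
  (PySem.List.pyRange 0 (data.length : Int) 1).foldl
    (fun (acc : List Int × List Int) i =>
      if sequenceid * size ≤ i ∧ i < (sequenceid + 1) * size then
        (acc.1, acc.2 ++ [PySem.List.pyGetD data i 0])
      else
        (acc.1 ++ [PySem.List.pyGetD data i 0], acc.2))
    ([], [])

-- ===== PORT B =====
def getTrainAndValidationData_alt (data : List Int) (v : Int) (sequenceid : Int) : List Int × List Int :=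
  let size := PySem.Int.truncdiv (data.length : Int) v
  let n : Int := (data.length : Int)
  let start := sequenceid * size
  let stop := start + size
  let lo := max 0 (min start n)
  let hi := max lo (min stop n)
  (PySem.List.slice data none (some lo) ++ PySem.List.slice data (some hi) none,
   PySem.List.slice data (some lo) (some hi))

-- ===== PRECONDITION & SPEC =====
-- Pre_ excludes exactly v = 0, on which Python A raises ZeroDivisionError.
def Pre_getTrainAndValidationData (data : List Int) (v : Int) (sequenceid : Int) : Prop := v ≠ 0
instance (data : List Int) (v : Int) (sequenceid : Int) : Decidable (Pre_getTrainAndValidationData data v sequenceid) := by unfold Pre_getTrainAndValidationData; infer_instance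
def pvWitness_getTrainAndValidationData : List Int × Int × Int := ([1, 2, 3, 4], 2, 0)
def Spec_getTrainAndValidationData (data : List Int) (v : Int) (sequenceid : Int) (out : List Int × List Int) : Prop := out = getTrainAndValidationData_alt data v sequenceid
instance (data : List Int) (v : Int) (sequenceid : Int) (out : List Int × List Int) : Decidable (Spec_getTrainAndValidationData data v sequenceid out) := by unfold Spec_getTrainAndValidationData; infer_instance

-- ===== CLAIM (what is proved, stated in full; the proofs are below) =====
def Claim_equal_getTrainAndValidationData : Prop := ∀ (data : List Int) (v : Int) (sequenceid : Int), Dom_getTrainAndValidationData data v sequenceid → Pre_getTrainAndValidationData data v sequenceid → Spec_getTrainAndValidationData data v sequenceid (getTrainAndValidationData data v sequenceid)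

-- ===== LEMMAS AND PROOFS =====

-- Invariant of A's loop after the first m iterations, phrased with B's clamped boundaries.
theorem loop_invariant (data : List Int) (s e : Int) (m : Nat) (hm : m ≤ data.length)
    (lo hi : Nat)
    (hlo : (lo : Int) = max 0 (min s (data.length : Int)))
    (hhi : (hi : Int) = max (lo : Int) (min e (data.length : Int))) :
    (PySem.List.pyRange 0 (m : Int) 1).foldl
      (fun (acc : List Int × List Int) i =>
        if s ≤ i ∧ i < e then
          (acc.1, acc.2 ++ [PySem.List.pyGetD data i 0])
        else
          (acc.1 ++ [PySem.List.pyGetD data i 0], acc.2))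
      ([], [])
    = (data.take (min lo m) ++ (data.take m).drop hi,
       (data.take (min hi m)).drop lo) := by
  induction m with
  | zero =>
      simp [PySem.List.pyRange_one_eq_nil]
  | succ m ih =>
      have hm' : m ≤ data.length := Nat.le_of_succ_le hm
      have hmlt : m < data.length := hm
      have hrange : PySem.List.pyRange 0 ((m : Int) + 1) 1
          = PySem.List.pyRange 0 (m : Int) 1 ++ [(m : Int)] :=
        PySem.List.pyRange_one_succ_right (by exact_mod_cast Nat.zero_le m)
      have hcast : ((m + 1 : Nat) : Int) = (m : Int) + 1 := by push_cast; ring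
      rw [hcast, hrange, List.foldl_append, ih hm']
      have hget : PySem.List.pyGetD data (m : Int) 0 = data.getD m 0 := by
        simp [PySem.List.pyGetD_natCast]
      have hx : data.getD m 0 = data[m]'hmlt := by
        simp [List.getD_eq_getElem?_getD, List.getElem?_eq_getElem hmlt]
      have htake : data.take (m + 1) = data.take m ++ [data[m]'hmlt] :=
        List.take_succ_eq_append_getElem hmlt
      simp only [List.foldl_cons, List.foldl_nil]
      by_cases hc : s ≤ (m : Int) ∧ (m : Int) < e
      · -- validation branch: lo ≤ m < hi
        have hlom : lo ≤ m := by omega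
        have hmhi : m < hi := by omega
        rw [if_pos hc]
        refine Prod.ext ?_ ?_
        · -- train unchanged
          simp only
          congr 1
          · congr 1; omega
          · have h1 : (data.take m).drop hi = [] := by
              apply List.drop_eq_nil_of_le; simp [List.length_take]; omega
            have h2 : (data.take (m + 1)).drop hi = [] := by
              apply List.drop_eq_nil_of_le; simp [List.length_take]; omega
            rw [h1, h2]
        · -- validation grows
          simp only [hget, hx]
          have hmin1 : min hi (m + 1) = m + 1 := by omega
          have hmin2 : min hi m = m := by omega
          rw [hmin1, hmin2, htake]
          rw [List.drop_append_of_le_length (by simp [List.length_take]; omega)]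
      · -- train branch: m < lo or hi ≤ m
        rw [if_neg hc]
        have hsplit : m < lo ∨ hi ≤ m := by
          by_contra h
          push_neg at h
          exact hc ⟨by omega, by omega⟩
        refine Prod.ext ?_ ?_
        · -- train grows
          simp only [hget, hx]
          rcases hsplit with h | h
          · -- m < lo: the new element extends the take-lo prefix; both drop-hi parts are []
            have hmin1 : min lo (m + 1) = m + 1 := by omega
            have hmin2 : min lo m = m := by omega
            have h1 : (data.take m).drop hi = [] := by
              apply List.drop_eq_nil_of_le; simp [List.length_take]; omega
            have h2 : (data.take (m + 1)).drop hi = [] := by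
              apply List.drop_eq_nil_of_le; simp [List.length_take]; omega
            rw [hmin1, hmin2, h1, h2, htake]; simp
          · -- hi ≤ m: the new element extends the drop-hi suffix
            have hmin1 : min lo (m + 1) = lo := by omega
            have hmin2 : min lo m = lo := by omega
            rw [hmin1, hmin2, htake]
            rw [List.drop_append_of_le_length (by simp [List.length_take]; omega)]
            simp [List.append_assoc]
        · -- validation unchanged
          simp only
          rcases hsplit with h | h
          · -- m < lo: both drops are empty
            have e1 : (data.take (min hi (m + 1))).drop lo = [] := by
              apply List.drop_eq_nil_of_le; simp [List.length_take]; omega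
            have e2 : (data.take (min hi m)).drop lo = [] := by
              apply List.drop_eq_nil_of_le; simp [List.length_take]; omega
            rw [e1, e2]
          · -- hi ≤ m: both mins are hi
            have h1 : min hi (m + 1) = hi := by omega
            have h2 : min hi m = hi := by omega
            rw [h1, h2]

-- ===== VERDICT (by name: the statement is the Claim_ definition above) =====
theorem getTrainAndValidationData_spec : Claim_equal_getTrainAndValidationData := by
  intro data v sequenceid _hDom _hPre
  unfold Spec_getTrainAndValidationData
  simp only [getTrainAndValidationData, getTrainAndValidationData_alt]
  set size := PySem.Int.truncdiv (data.length : Int) v with hsize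
  set n : Int := (data.length : Int) with hn
  set s := sequenceid * size with hs
  set e := s + size with he
  have hn0 : 0 ≤ n := by positivity
  set lo : Int := max 0 (min s n) with hlo
  set hi : Int := max lo (min e n) with hhi
  have hlo0 : 0 ≤ lo := by omega
  have hhilo : lo ≤ hi := by omega
  have hlon : lo ≤ n := by omega
  have hhin : hi ≤ n := by omega
  have hloNat : ((lo.toNat : Nat) : Int) = lo := Int.toNat_of_nonneg hlo0
  have hhiNat : ((hi.toNat : Nat) : Int) = hi := Int.toNat_of_nonneg (le_trans hlo0 hhilo)
  have hse : (sequenceid + 1) * size = e := by rw [he, hs]; ring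
  have hinv := loop_invariant data s e data.length (le_refl _) lo.toNat hi.toNat
    (by rw [hloNat, hlo, hn]) (by rw [hhiNat, hhi, hloNat, hn])
  have hmin1 : min lo.toNat data.length = lo.toNat := by omega
  have hmin2 : min hi.toNat data.length = hi.toNat := by omega
  simp only [hse]
  rw [hinv, hmin1, hmin2, List.take_length]
  rw [PySem.List.slice_to (xs := data) hlo0, PySem.List.slice_from (xs := data) (le_trans hlo0 hhilo),
      PySem.List.slice_toNat (xs := data) hlo0 (le_trans hlo0 hhilo)]
  simp [List.drop_take]
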